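-- pv_equiv track=rewrite | github.com/wangr0031/example | module_etc/test4.py | GetDnsString
-- ===== SOURCE A (Python) =====
-- def GetDnsString(dbuser):
--     DbConDnsInfo = {
--         'instance': {'cc': ['apig', 'ftf', 'cic', 'cpc', 'cpc_flow', 'custc', 'oc', 'drm', 'ebc', 'pos', 'sa', 'src'],
--                      'pmt': ['ab', 'bc', 'pcc'],
--                      'rb': ['pcb', 'inv', 'rb'],
--                      'sett': ['med', 'sett'],
--                      'stbp': ['stbp', 'etl', 'dap']},
--         'dburl': {'cc': ['172.16.80.11', '11521'],
--                   'pmt': ['172.16.80.12', '11521'],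
--                   'sett': ['172.16.80.13', '11521'],
--                   'stbp': ['172.16.80.14', '11521']}
--     }
--     for one_instance in DbConDnsInfo['instance']:
--         if isinstance(DbConDnsInfo['instance'][one_instance], list):
--             for one_value in DbConDnsInfo['instance'][one_instance]:
--                 if one_value == dbuser:
--                     db_instance = one_instance
--                     db_string = 'jdbc:oracle:thin:@' + DbConDnsInfo['dburl'][db_instance][0] + ':' + \
--                                 DbConDnsInfo['dburl'][db_instance][1] + '/' + db_instance
--                     return db_string
--                 else:
--                     continue
-- ===== SOURCE B (Python) =====
-- def GetDnsString(dbuser):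
--     DbConDnsInfo = {
--         'instance': {'cc': ['apig', 'ftf', 'cic', 'cpc', 'cpc_flow', 'custc', 'oc', 'drm', 'ebc', 'pos', 'sa', 'src'],
--                      'pmt': ['ab', 'bc', 'pcc'],
--                      'rb': ['pcb', 'inv', 'rb'],
--                      'sett': ['med', 'sett'],
--                      'stbp': ['stbp', 'etl', 'dap']},
--         'dburl': {'cc': ['172.16.80.11', '11521'],
--                   'pmt': ['172.16.80.12', '11521'],
--                   'sett': ['172.16.80.13', '11521'],
--                   'stbp': ['172.16.80.14', '11521']}
--     }
--     # build a reverse index user -> instance once, then a single lookup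
--     user_to_instance = {u: inst for inst, users in DbConDnsInfo['instance'].items() for u in users}
--     inst = user_to_instance.get(dbuser)
--     if inst is None:
--         return None
--     host, port = DbConDnsInfo['dburl'][inst]
--     return 'jdbc:oracle:thin:@' + host + ':' + port + '/' + inst
-- ===== Notes on version B (the rewrite author's own statement) =====
-- stated objective: simpler
-- what changed: Replaces the nested scan over the instance tables by a flat reverse index (user -> instance) built once with a dict comprehension, followed by a single lookup and one formatting step.
-- outside the precondition, e.g. on GetDnsString('rb'): A raises KeyError, B raises KeyError
import Mathlib
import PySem

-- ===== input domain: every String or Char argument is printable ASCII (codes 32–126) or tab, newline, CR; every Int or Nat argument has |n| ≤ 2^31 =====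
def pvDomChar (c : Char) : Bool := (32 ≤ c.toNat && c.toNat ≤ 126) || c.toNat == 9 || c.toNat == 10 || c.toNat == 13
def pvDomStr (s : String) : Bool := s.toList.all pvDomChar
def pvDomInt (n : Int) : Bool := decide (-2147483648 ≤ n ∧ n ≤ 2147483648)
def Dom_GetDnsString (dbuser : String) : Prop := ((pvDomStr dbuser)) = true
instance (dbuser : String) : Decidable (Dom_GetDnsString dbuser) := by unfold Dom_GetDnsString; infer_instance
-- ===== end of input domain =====

-- B replaces A's nested scan over the instance tables by a flat reverse index (user -> instance)
-- built once, then a single lookup; objective: simpler.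


-- ===== PORT A =====
-- the 'instance' dict, in insertion order
def pvInstTable : List (String × List String) :=
  [("cc", ["apig", "ftf", "cic", "cpc", "cpc_flow", "custc", "oc", "drm", "ebc", "pos", "sa", "src"]),
   ("pmt", ["ab", "bc", "pcc"]),
   ("rb", ["pcb", "inv", "rb"]),
   ("sett", ["med", "sett"]),
   ("stbp", ["stbp", "etl", "dap"])]

-- the 'dburl' dict
def pvDburl : PySem.Dict String (List String) :=
  PySem.Dict.ofList
  [("cc", ["172.16.80.11", "11521"]),
   ("pmt", ["172.16.80.12", "11521"]),
   ("sett", ["172.16.80.13", "11521"]),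
   ("stbp", ["172.16.80.14", "11521"])]

-- db_string = 'jdbc:oracle:thin:@' + dburl[inst][0] + ':' + dburl[inst][1] + '/' + inst
-- (none = the KeyError/IndexError of A, excluded by Pre_)
def pvBuildA (inst : String) : Option String :=
  match PySem.Dict.get? pvDburl inst with
  | none => none
  | some l =>
    match PySem.List.pyGet? l 0, PySem.List.pyGet? l 1 with
    | some h, some p => some ("jdbc:oracle:thin:@" ++ h ++ ":" ++ p ++ "/" ++ inst)
    | _, _ => none

-- inner loop: for one_value in users: if one_value == dbuser: return db_string
def pvInnerA (dbuser inst : String) : List String → Option String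
  | [] => none
  | u :: us => if u == dbuser then pvBuildA inst else pvInnerA dbuser inst us

-- outer loop over the instance dict (the isinstance check is always true for these literal lists)
def pvOuterA (dbuser : String) : List (String × List String) → Option String
  | [] => none
  | (inst, users) :: rest =>
    match pvInnerA dbuser inst users with
    | some s => some s
    | none => pvOuterA dbuser rest

def GetDnsString (dbuser : String) : Option String := pvOuterA dbuser pvInstTable

-- ===== PORT B =====
-- user_to_instance = {u: inst for inst, users in instance.items() for u in users}
def pvRevMap : PySem.Dict String String :=
  pvInstTable.foldl (fun d p => p.2.foldl (fun d u => PySem.Dict.insert d u p.1) d) PySem.Dict.empty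

def GetDnsString_alt (dbuser : String) : Option String :=
  match PySem.Dict.get? pvRevMap dbuser with
  | none => none
  | some inst =>
    match PySem.Dict.get? pvDburl inst with
    | none => none  -- KeyError in B, excluded by Pre_
    | some l =>
      match PySem.List.pyGet? l 0, PySem.List.pyGet? l 1 with
      | some h, some p => some ("jdbc:oracle:thin:@" ++ h ++ ":" ++ p ++ "/" ++ inst)
      | _, _ => none

-- ===== PRECONDITION & SPEC =====
-- A raises KeyError for the users of the 'rb' instance ('pcb', 'inv', 'rb'): 'rb' has no
-- entry in the dburl table; B raises there too, so exactly those inputs are excluded.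
def Pre_GetDnsString (dbuser : String) : Prop := dbuser ∉ (["pcb", "inv", "rb"] : List String)
instance (dbuser : String) : Decidable (Pre_GetDnsString dbuser) := by unfold Pre_GetDnsString; infer_instance
def pvWitness_GetDnsString : String := "apig"

def Spec_GetDnsString (dbuser : String) (out : Option String) : Prop := out = GetDnsString_alt dbuser
instance (dbuser : String) (out : Option String) : Decidable (Spec_GetDnsString dbuser out) := by unfold Spec_GetDnsString; infer_instance

-- ===== CLAIM (what is proved, stated in full; the proofs are below) =====
def Claim_equal_GetDnsString : Prop := ∀ (dbuser : String), Dom_GetDnsString dbuser → Pre_GetDnsString dbuser → Spec_GetDnsString dbuser (GetDnsString dbuser)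

-- ===== LEMMAS AND PROOFS =====
-- every user string appearing in the tables
def pvAllUsers : List String :=
  ["apig", "ftf", "cic", "cpc", "cpc_flow", "custc", "oc", "drm", "ebc", "pos", "sa", "src",
   "ab", "bc", "pcc", "pcb", "inv", "rb", "med", "sett", "stbp", "etl", "dap"]

-- ===== VERDICT (by name: the statement is the Claim_ definition above) =====
theorem GetDnsString_spec : Claim_equal_GetDnsString := by
  intro d _ hpre
  unfold Spec_GetDnsString
  by_cases h : d ∈ pvAllUsers
  · unfold pvAllUsers at h
    fin_cases h <;> first
      | exact absurd hpre (by decide)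
      | decide
  · unfold pvAllUsers at h
    simp only [List.mem_cons, List.not_mem_nil, or_false, not_or] at h
    obtain ⟨h1,h2,h3,h4,h5,h6,h7,h8,h9,h10,h11,h12,h13,h14,h15,h16,h17,h18,h19,h20,h21,h22,h23⟩ := h
    simp [GetDnsString, GetDnsString_alt, pvOuterA, pvInnerA, pvInstTable, pvRevMap,
          PySem.Dict.get?, PySem.Dict.insert, PySem.Dict.empty, beq_iff_eq,
          Ne.symm h1, Ne.symm h2, Ne.symm h3, Ne.symm h4, Ne.symm h5, Ne.symm h6, Ne.symm h7,
          Ne.symm h8, Ne.symm h9, Ne.symm h10, Ne.symm h11, Ne.symm h12, Ne.symm h13, Ne.symm h14,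
          Ne.symm h15, Ne.symm h16, Ne.symm h17, Ne.symm h18, Ne.symm h19, Ne.symm h20, Ne.symm h21,
          Ne.symm h22, Ne.symm h23]
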